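/- GENERATED by mk_final_copies.py from the proof of the farm's unit `vorbis_decode_packet_rest.2c` (farm:vorbis_decode_packet_rest.2c.1: Proof.lean) as the
   re-elaboration sweep compiled it — do not edit. -/
import Asan.CheckWalk
import Vorbis.Spec.PacketRestFrame
import Vorbis.Spec.Units.vorbis_decode_packet_rest_2c
import Vorbis.Spec.Worked.vorbis_decode_packet_rest_2c_Lemmas

namespace Vorbis.Spec.vorbis_decode_packet_rest_2c
open X86 X86.User Asan Vorbis Vorbis.Spec Vorbis.Spec.vorbis_decode_packet_rest

set_option maxRecDepth 8000 in
set_option maxHeartbeats 16000000 in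
/-- **The first half of segment .2c** (0x111403 … 0x111416 and the return of `ilog` at 0x11141b; lines 3240–3241): `finalY[0] = ` the
value read (the check of the store: the block at `finalY[i]` holds at least four bytes, FY1 + FL8), `ilog(range)` with `range` from
the spill slot `[rsp + 0x4c]`. At the return: the carried part `Seg2cCore` again (stores: two return addresses, ilog's frame,
`finalY[0]`) and `7 ≤ rax = ilog(range) ≤ 9` (SH7 for `log2_4`, kept by the store into the arena block: `DecodeInv.tables_kept`). -/
theorem seg2c_first {Lay : Layout} (hLay : Lay.hi = 0x1000000) {μ : Microarch} (hμ : UserX.MicroOK μ) {u₀ : State}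
    (hcode : HasCodeNat Lay u₀ Vorbis.L.vorbis_decode_packet_rest.entry Vorbis.Code.code_vorbis_decode_packet_rest.nat
      Vorbis.L.vorbis_decode_packet_rest.size)
    (h_ilog : ∀ (others : List Obj) (frames : List (Nat × FrameLayout)),
      Calls Lay μ Vorbis.WayInv (Vorbis.conv u₀) Vorbis.L.ilog.entry (Vorbis.Spec.ilog.spec others frames))
    (h_store2 : Asan.SmallCheck Lay μ Vorbis.WayInv (Vorbis.CodeOK u₀) [.rax, .rcx, .rdx] 2 Vorbis.L.__asan_store2_noabort.entry)
    {others : List Obj} {frames : List (Nat × FrameLayout)} {len : Nat} {Ar : Arena} {stored room : Int}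
    {mode : Nat} {ysz : Nat → Nat} {e v : State} {ret : Word} {i : Nat}
    (hat : At2c u₀ others frames len Ar stored room mode ysz e ret i v) :
    ReachVia Lay μ Vorbis.WayInv v (fun w =>
      Seg2cCore u₀ others frames len Ar stored room mode ysz e ret i w ∧
        w.rip = Vorbis.L.vorbis_decode_packet_rest.cut20 ∧ 7 ≤ (w.reg .rax).toNat ∧ (w.reg .rax).toNat ≤ 9) := by
  -- 1. the ENTRY state's facts
  have he := hat.entry
  v_entry he
  have hil := h_ilog others (framesIn frames e)
  -- 2. the present state
  have w_rip := hat.rip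
  have c_rsp : v.reg .rsp = e.reg .rsp - 3000 := hat.rsp
  have w_kept : RegsKept [.rsp] v v := RegsKept.refl _ _
  have w_eq : Mem.EqOn Vorbis.L.textLo Vorbis.L.textHi u₀.mem v.mem := hat.code
  have hdf : v.flags .df = false := (show abiInv _ from hat.abi).1
  have hmx : v.mxcsr &&& 0x1F80 = 0x1F80 := (show abiInv _ from hat.abi).2
  have hsse := Vorbis.sseOK_of_abiInv hat.abi
  have hinv := hat.inv
  have hcore := Seg2cCore.of_at2c hat
  -- where `*f` is
  obtain ⟨hfoff0, hfin0⟩ := SpanOK.geom_obj hinv he_top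
  have hfoff : (e.reg .rdi).toNat + 1808 ≤ 0x700000 ∨ 0x800020 ≤ (e.reg .rdi).toNat := hfoff0
  have hfin : (e.reg .rdi).toNat + 1808 ≤ 0xC00000 := hfin0
  -- the block at `finalY[i]`: where it is, and that it holds `finalY[0]`, `finalY[1]`
  obtain ⟨hy4, hfy1, hfy2, hfy3, hfy4⟩ := seg2c_fy_where hinv hat.i_lt hat.g
  have hfyc := hat.i_lt
  obtain ⟨fy, hfy⟩ : ∃ fy : Nat, stb_vorbis.finalY v.mem (fOf e) i = fy := ⟨_, rfl⟩
  rw [hfy] at hfy1 hfy2 hfy3 hfy4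
  have hfy4' : fy + ysz i ≤ (e.reg .rdi).toNat ∨ (e.reg .rdi).toNat + 1808 ≤ fy := hfy4
  have hr12 : (v.reg .r12).toNat = fy := by
    rw [← hfy]
    exact hat.r12
  have c_r12 : v.reg .r12 = addr fy := eq_addr _ _ hr12
  have hfyN : (addr fy).toNat = fy := toNat_addr _ (by omega)
  -- 3. the spill of `range` (`[rsp + 0x4c]`), loaded at 0x111412
  obtain ⟨rg, hrg⟩ : ∃ rg : Nat, v.mem.readLE (e.reg .rsp - 2924) 4 = rg := ⟨_, rfl⟩
  have hrgv : rg = 256 ∨ rg = 128 ∨ rg = 86 ∨ rg = 64 := by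
    have h := hat.slot_range
    simp only [slot32, spOf, addr_norm] at h
    rw [hrg] at h
    exact h
  -- 4. 0x111403 … 0x111416: the walk to the call of ilog and over it
  u_walk hcode [hμ.vendor] until [Vorbis.L.vorbis_decode_packet_rest.cut20] span [Vorbis.L.textLo, Vorbis.L.textHi] side (v_side)
  case check_111408 =>
    -- 0x111408, store2 `finalY[0]` = `[r12]`: inside the allocated block at `finalY[i]` (FY1; `4 ≤ ysz i` by FL8)
    have hun : ShadowUntouched v.mem s_111408.mem := by v_untouched
    have hblk := (hinv.fy i hat.i_lt).1
    rw [hfy] at hblk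
    have hsite : Site (LiveSet others (framesIn frames e)) fy 2 :=
      Site.of_blk hinv.live hblk (by simp only []; omega) (by simp only []; omega) (by omega)
    exact Vorbis.Spec.check_site hat.shadow hun hsite (by u_omega)
  case call_inv =>
    v_inv
  case pre_111416 =>
    -- ilog's precondition: the shadow layer at the callee's entry; `log2_4` is a live object (SH5)
    have hun : ShadowUntouched v.mem s_111416.mem := by v_untouched
    have etop : (s_111416.reg .rsp).toNat + 8 = (spOf e).toNat := by
      rw [w_rsp]
      u_omega
    refine ⟨⟨?_, hat.pre.1.offText⟩, hinv.g_log2⟩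
    rw [etop]
    exact hat.shadow.untouched hun
  case cont =>
    -- 0x11141b, after the call of ilog
    -- SH7 at ilog's entry: the stores so far are two return addresses and `finalY[0]`
    have hs0 : Mem.SameExcept [⟨(e.reg .rsp).toNat - 3008, (e.reg .rsp).toNat - 3000⟩, ⟨fy, fy + 2⟩]
        v.mem s_111416.mem := by
      rw [w_mem_111416]
      u_same
    have hsp0 : ∀ w, w ∈ [(⟨(e.reg .rsp).toNat - 3008, (e.reg .rsp).toNat - 3000⟩ : Span), ⟨fy, fy + 2⟩] →
        SpanOK ysz v.mem (e.reg .rsp).toNat (fOf e) w := by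
      intro w hw
      simp only [List.mem_cons, List.mem_nil_iff, or_false] at hw
      rcases hw with rfl | rfl
      · exact SpanOK.below (by simp only []; omega) (by simp only []; omega)
      · exact SpanOK.finalY i hfyc (by rw [hfy]; simp only []; omega) (by simp only []; omega)
          (by rw [hfy]; simp only []; omega)
    have hlog : Log2_4In s_111416.mem :=
      (hinv.tables_kept hs0 (fun w hw => (SpanOK.geom hinv he_room he_top (hsp0 w hw)).1)).log2
    obtain ⟨hpun, _, hpval⟩ := w_post
    have hval := hpval hlog
    rw [w_rdi_111416] at hval
    obtain ⟨hv7, hv9⟩ := seg2c_ilog_val rg hrgv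
    rw [← hval] at hv7 hv9
    v_after_call w_rsp_111416 w_mem_111416
    -- the spill slot `[0x20]`, then the footprint since the segment's entry
    have sfy : slot64 e s_111416r 0x20 = slot64 e v 0x20 := by
      simp only [slot64, spOf, addr_norm]
      obtain ⟨q, hq⟩ : ∃ q, v.mem.readLE (e.reg .rsp - 2968) 8 = q := ⟨_, rfl⟩
      rw [hq]
      u_frame hq
    have hs : Mem.SameExcept [⟨(e.reg .rsp).toNat - 3856, (e.reg .rsp).toNat - 3000⟩, ⟨fy, fy + 2⟩]
        v.mem s_111416r.mem := by
      u_same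
    have hsp : ∀ w, w ∈ [(⟨(e.reg .rsp).toNat - 3856, (e.reg .rsp).toNat - 3000⟩ : Span), ⟨fy, fy + 2⟩] →
        SpanOK ysz v.mem (e.reg .rsp).toNat (fOf e) w := by
      intro w hw
      simp only [List.mem_cons, List.mem_nil_iff, or_false] at hw
      rcases hw with rfl | rfl
      · exact SpanOK.below (by simp only []; omega) (by simp only []; omega)
      · exact SpanOK.finalY i hfyc (by rw [hfy]; simp only []; omega) (by simp only []; omega)
          (by rw [hfy]; simp only []; omega)
    have hun : ShadowUntouched v.mem s_111416r.mem := by v_untouched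
    have hobj : (objBlock (fOf e)).Same v.mem s_111416r.mem := by
      apply hs.eqOn
      intro w hw
      simp only [List.mem_cons, List.mem_nil_iff, or_false] at hw
      rcases hw with rfl | rfl <;> simp only [vblock, voff] <;> omega
    have hbits : Bits (RunBlk Ar len) len s_111416r.mem (fOf e) :=
      hinv.fb.vorbis.bits.frame_fields (Bits.SameFields.of_same hobj)
    have habi : abiInv s_111416r := by v_inv
    have hcore' := seg2c_core_carry hcore hs hsp hun w_rsp w_eq habi hbits (w_kept .r12 rfl) (w_kept .r13 rfl)
      (w_kept .r14 rfl) (w_kept .r15 rfl) (w_kept .rbp rfl) sfy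
    exact ReachVia.done ⟨hcore', w_rip, hv7, hv9⟩

set_option maxRecDepth 8000 in
set_option maxHeartbeats 16000000 in
/-- **The second half of segment .2c** (0x11141b … 0x111421 and the return of `get_bits` at 0x111426; line 3241):
`get_bits(f, ilog(range) − 1)` with `7 ≤ ilog(range) ≤ 9`. At the return: `At2d` (stores: the return address, get_bits's frames,
the bit reader's windows of `*f`; `Bits` from get_bits's post). -/
theorem seg2c_second {Lay : Layout} (hLay : Lay.hi = 0x1000000) {μ : Microarch} (hμ : UserX.MicroOK μ) {u₀ : State}
    (hcode : HasCodeNat Lay u₀ Vorbis.L.vorbis_decode_packet_rest.entry Vorbis.Code.code_vorbis_decode_packet_rest.nat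
      Vorbis.L.vorbis_decode_packet_rest.size)
    (h_get_bits : ∀ (others : List Obj) (frames : List (Nat × FrameLayout)) (Blk : Block → Prop) (len : Nat),
      Calls Lay μ Vorbis.WayInv (Vorbis.conv u₀) Vorbis.L.get_bits.entry (Vorbis.Spec.get_bits.spec others frames Blk len))
    {others : List Obj} {frames : List (Nat × FrameLayout)} {len : Nat} {Ar : Arena} {stored room : Int}
    {mode : Nat} {ysz : Nat → Nat} {e v : State} {ret : Word} {i : Nat}
    (hat : Seg2cCore u₀ others frames len Ar stored room mode ysz e ret i v)
    (hrip : v.rip = Vorbis.L.vorbis_decode_packet_rest.cut20)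
    (hv7 : 7 ≤ (v.reg .rax).toNat) (hv9 : (v.reg .rax).toNat ≤ 9) :
    ReachVia Lay μ Vorbis.WayInv v (fun w => At2d u₀ others frames len Ar stored room mode ysz e ret i w) := by
  -- 1. the ENTRY state's facts
  have he := hat.entry
  v_entry he
  have hgb := h_get_bits others (framesIn frames e) (RunBlk Ar len) len
  -- 2. the present state
  have w_rip : v.rip = 0x11141b := hrip
  clear hrip
  have c_rsp : v.reg .rsp = e.reg .rsp - 3000 := hat.rsp
  have w_kept : RegsKept [.rsp] v v := RegsKept.refl _ _
  have w_eq : Mem.EqOn Vorbis.L.textLo Vorbis.L.textHi u₀.mem v.mem := hat.code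
  have hdf : v.flags .df = false := (show abiInv _ from hat.abi).1
  have hmx : v.mxcsr &&& 0x1F80 = 0x1F80 := (show abiInv _ from hat.abi).2
  have hsse := Vorbis.sseOK_of_abiInv hat.abi
  have hinv := hat.inv
  obtain ⟨hfoff0, hfin0⟩ := SpanOK.geom_obj hinv he_top
  have hfoff : (e.reg .rdi).toNat + 1808 ≤ 0x700000 ∨ 0x800020 ≤ (e.reg .rdi).toNat := hfoff0
  have hfin : (e.reg .rdi).toNat + 1808 ≤ 0xC00000 := hfin0
  have c_rbp : v.reg .rbp = e.reg .rdi := by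
    apply UInt64.toNat_inj.mp
    exact hat.rbp
  obtain ⟨z, c_rax, hz7, hz9⟩ : ∃ z : Nat, v.reg .rax = UInt64.ofNat z ∧ 7 ≤ z ∧ z ≤ 9 :=
    ⟨(v.reg .rax).toNat, (UInt64.ofNat_toNat).symm, hv7, hv9⟩
  u_walk hcode [hμ.vendor] until [Vorbis.L.vorbis_decode_packet_rest.cut21] span [Vorbis.L.textLo, Vorbis.L.textHi] side (v_side)
  case call_inv =>
    v_inv
  case pre_111421 =>
    -- get_bits's precondition: the shadow layer at the callee's entry, the reader's environment, `Bits f` (only the return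
    -- address was stored since the cut), and the bit count `ilog(range) − 1 ≤ 32`
    have hun : ShadowUntouched v.mem s_111421.mem := by v_untouched
    have etop : (s_111421.reg .rsp).toNat + 8 = (spOf e).toNat := by
      rw [w_rsp]
      u_omega
    have hs0 : Mem.SameExcept [⟨(e.reg .rsp).toNat - 3008, (e.reg .rsp).toNat - 3000⟩] v.mem s_111421.mem := by
      u_same
    have hobj : (objBlock (fOf e)).Same v.mem s_111421.mem := by
      apply hs0.eqOn
      intro w hw
      rw [List.mem_singleton.mp hw]
      simp only [vblock, voff]
      omega
    have hbits : Bits (RunBlk Ar len) len s_111421.mem (fOf e) :=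
      hinv.fb.vorbis.bits.frame_fields (Bits.SameFields.of_same hobj)
    refine ⟨⟨⟨?_, hat.pre.1.offText⟩, ?_, ?_⟩, ?_⟩
    · rw [etop]
      exact hat.shadow.untouched hun
    · rw [w_rdi]
      exact hinv.readerEnv
    · rw [w_rdi]
      exact hbits
    · rw [bitsArg_def, w_rsi]
      exact seg2c_bits_arg z hz7 hz9
  case cont =>
    -- 0x111426, after the call of get_bits
    obtain ⟨hpun, hpbits⟩ := w_post
    rw [w_rdi_111421] at hpbits
    have hbits : Bits (RunBlk Ar len) len s_111421r.mem (fOf e) := hpbits.bits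
    v_after_call w_rsp_111421 w_mem_111421
    simp only [w_rdi_111421] at w_same
    -- the spill slot `[0x20]`, then the footprint since the cut: the stack below the steady rsp, the bit reader's windows
    have sfy : slot64 e s_111421r 0x20 = slot64 e v 0x20 := by
      simp only [slot64, spOf, addr_norm]
      obtain ⟨q, hq⟩ : ∃ q, v.mem.readLE (e.reg .rsp - 2968) 8 = q := ⟨_, rfl⟩
      rw [hq]
      u_frame hq
    have hs : Mem.SameExcept [⟨(e.reg .rsp).toNat - 3856, (e.reg .rsp).toNat - 3000⟩,
        ⟨(e.reg .rdi).toNat + 48, (e.reg .rdi).toNat + 56⟩, ⟨(e.reg .rdi).toNat + 84, (e.reg .rdi).toNat + 96⟩,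
        ⟨(e.reg .rdi).toNat + 136, (e.reg .rdi).toNat + 144⟩, ⟨(e.reg .rdi).toNat + 1484, (e.reg .rdi).toNat + 1749⟩,
        ⟨(e.reg .rdi).toNat + 1752, (e.reg .rdi).toNat + 1784⟩] v.mem s_111421r.mem := by
      u_same
    have hsp : ∀ w, w ∈ [(⟨(e.reg .rsp).toNat - 3856, (e.reg .rsp).toNat - 3000⟩ : Span),
        ⟨(e.reg .rdi).toNat + 48, (e.reg .rdi).toNat + 56⟩, ⟨(e.reg .rdi).toNat + 84, (e.reg .rdi).toNat + 96⟩,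
        ⟨(e.reg .rdi).toNat + 136, (e.reg .rdi).toNat + 144⟩, ⟨(e.reg .rdi).toNat + 1484, (e.reg .rdi).toNat + 1749⟩,
        ⟨(e.reg .rdi).toNat + 1752, (e.reg .rdi).toNat + 1784⟩] →
        SpanOK ysz v.mem (e.reg .rsp).toNat (fOf e) w := by
      intro w hw
      rcases List.mem_cons.mp hw with rfl | hw'
      · exact SpanOK.below (by simp only []; omega) (by simp only []; omega)
      · exact SpanOK.of_winsBits hw'
    have hun : ShadowUntouched v.mem s_111421r.mem := by v_untouched
    have habi : abiInv s_111421r := by v_inv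
    have hcore' := seg2c_core_carry hat hs hsp hun w_rsp w_eq habi hbits (w_kept .r12 rfl) (w_kept .r13 rfl)
      (w_kept .r14 rfl) (w_kept .r15 rfl) (w_kept .rbp rfl) sfy
    exact ReachVia.done (hcore'.to_at2d w_rip)

end Vorbis.Spec.vorbis_decode_packet_rest_2c

/-- Segment .2c of `vorbis_decode_packet_rest` (0x111403 … 0x111421, stb_vorbis_fixed.c:3240–3241: `finalY[0] = ` the value just
read, `finalY[1] = get_bits(f, ilog(range) − 1)` up to the return of get_bits), from `At2c` to `At2d`: the two halves
`seg2c_first` (to the return of `ilog`, 0x11141b) and `seg2c_second` (to the return of `get_bits`, 0x111426), chained. -/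
theorem Vorbis.Spec.Worked.vorbis_decode_packet_rest_2c_ok : Vorbis.Spec.vorbis_decode_packet_rest_2c.Statement := by
  intro Lay hLay μ hμ u₀ hcode h_get_bits h_ilog h_store2
  intro others frames len Ar stored room mode ysz e ret i v hat
  refine (Vorbis.Spec.vorbis_decode_packet_rest_2c.seg2c_first hLay hμ hcode h_ilog h_store2 hat).trans ?_
  intro w hw
  obtain ⟨hcore, hrip, hv7, hv9⟩ := hw
  exact Vorbis.Spec.vorbis_decode_packet_rest_2c.seg2c_second hLay hμ hcode h_get_bits hcore hrip hv7 hv9
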